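-- pv_equiv track=rewrite | github.com/coke05288/Algorithm-Python | Greedy/Baekjoon-1946-신입사원.py | solution
-- ===== SOURCE A (Python) =====
-- def solution(_zi_ong):
--     answer = 1
--     temp = _zi_ong[0][1]
--     for i in range(0, len(_zi_ong)):
--         if temp > _zi_ong[i][1]:
--             temp = _zi_ong[i][1]
--             answer += 1
--
--     return answer
-- ===== SOURCE B (Python) =====
-- def solution(_zi_ong):
--     # Two-phase decomposition: build the full prefix-minimum table of the
--     # second coordinates, then count its distinct values (one per record low).
--     lows = [min(s for _, s in _zi_ong[:i + 1]) for i in range(len(_zi_ong))]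
--     return len(set(lows))
-- ===== Notes on version B (the rewrite author's own statement) =====
-- stated objective: alternative
-- what changed: Replaces A's fused running-min-plus-counter single pass with a two-phase decomposition: build the full prefix-minimum table of the second coordinates, then count its distinct values.
-- crash fix: On the empty list A raises IndexError (it reads _zi_ong[0][1]); B returns 0, the number of hired candidates among none. — e.g. on solution([]): A raises IndexError, B returns 0
import Mathlib
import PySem

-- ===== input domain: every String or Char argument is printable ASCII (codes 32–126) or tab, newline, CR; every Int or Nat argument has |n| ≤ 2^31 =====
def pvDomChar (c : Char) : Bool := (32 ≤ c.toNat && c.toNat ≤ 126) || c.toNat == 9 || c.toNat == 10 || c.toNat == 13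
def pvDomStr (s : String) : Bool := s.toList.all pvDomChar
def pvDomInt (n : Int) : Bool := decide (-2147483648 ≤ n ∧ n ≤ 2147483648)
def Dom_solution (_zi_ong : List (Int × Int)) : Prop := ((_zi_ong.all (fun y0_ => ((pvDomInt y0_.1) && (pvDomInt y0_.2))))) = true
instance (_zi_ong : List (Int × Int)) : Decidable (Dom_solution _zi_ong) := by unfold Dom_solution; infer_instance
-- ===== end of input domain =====

-- B replaces A's fused running-min counter loop with a prefix-minimum table followed by a distinct-value count; return-value equivalence proved on nonempty input.

-- ===== PORT A =====
def solution (_zi_ong : List (Int × Int)) : Int :=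
  let temp := (PySem.List.pyGetD _zi_ong 0 (0, 0)).2
  let st := (PySem.List.pyRange 0 (_zi_ong.length : Int) 1).foldl
    (fun (p : Int × Int) i =>
      let v := (PySem.List.pyGetD _zi_ong i (0, 0)).2
      if p.2 > v then (p.1 + 1, v) else p) (1, temp)
  st.1

-- ===== PORT B =====
def solution_alt (_zi_ong : List (Int × Int)) : Int :=
  let lows := (PySem.List.pyRange 0 (_zi_ong.length : Int) 1).map
    (fun i => (PySem.List.min? ((PySem.List.slice _zi_ong none (some (i + 1))).map Prod.snd)
                (fun x => x)).getD 0)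
  ((PySem.Set.ofList lows).length : Int)

-- ===== PRECONDITION & SPEC =====
-- Pre_ excludes only the empty list, on which A raises IndexError at _zi_ong[0][1].
def Pre_solution (_zi_ong : List (Int × Int)) : Prop := _zi_ong ≠ []
instance (_zi_ong : List (Int × Int)) : Decidable (Pre_solution _zi_ong) := by unfold Pre_solution; infer_instance
def pvWitness_solution : (List (Int × Int)) := [(1, 2), (3, 1)]

-- On the empty list A raises IndexError (it reads _zi_ong[0][1]); B returns 0.
def Raises_solution (_zi_ong : List (Int × Int)) : Prop := _zi_ong = []
instance (_zi_ong : List (Int × Int)) : Decidable (Raises_solution _zi_ong) := by unfold Raises_solution; infer_instance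
def pvRaiseWitness_solution : (List (Int × Int)) := []
def pvRaiseWitnessOut_solution : Int := 0

def Spec_solution (_zi_ong : List (Int × Int)) (out : Int) : Prop := out = solution_alt _zi_ong
instance (_zi_ong : List (Int × Int)) (out : Int) : Decidable (Spec_solution _zi_ong out) := by unfold Spec_solution; infer_instance

-- ===== CLAIM (what is proved, stated in full; the proofs are below) =====
def Claim_equal_solution : Prop := ∀ (_zi_ong : List (Int × Int)), Dom_solution _zi_ong → Pre_solution _zi_ong → Spec_solution _zi_ong (solution _zi_ong)
def Claim_raises_solution : Prop := (∀ (_zi_ong : List (Int × Int)), Dom_solution _zi_ong → Raises_solution _zi_ong → ¬ Pre_solution _zi_ong) ∧ (Dom_solution (pvRaiseWitness_solution) ∧ Raises_solution (pvRaiseWitness_solution) ∧ solution_alt (pvRaiseWitness_solution) = pvRaiseWitnessOut_solution)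

-- ===== LEMMAS AND PROOFS =====

-- the prefix-minimum sequence (proof helper)
def pvMins (a : Int) : List Int → List Int
  | [] => [a]
  | v :: vs => a :: pvMins (min a v) vs

-- the loop body of A, on the value a pair's second component
def pvStep (p : Int × Int) (v : Int) : Int × Int := if p.2 > v then (p.1 + 1, v) else p

-- every element of the prefix-min sequence is ≥ the total min
lemma pv_mins_head_le (vs : List Int) (a : Int) : ∀ x ∈ pvMins a vs, vs.foldl min a ≤ x := by
  induction vs generalizing a with
  | nil => simp [pvMins]
  | cons v vs ih =>
    intro x hx
    rw [pvMins, List.mem_cons] at hx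
    rcases hx with rfl | hx
    · calc vs.foldl min (min x v) ≤ min x v := ih (min x v) _ (by cases vs <;> simp [pvMins])
           _ ≤ x := min_le_left _ _
    · exact ih _ x hx

lemma pv_foldl_min_mem_scanl (vs : List Int) (a : Int) :
    vs.foldl min a ∈ pvMins a vs := by
  induction vs generalizing a with
  | nil => simp [pvMins]
  | cons v vs ih => simpa [pvMins] using Or.inr (ih (min a v))

lemma pv_scanl_append (vs : List Int) (a v : Int) :
    pvMins a (vs ++ [v]) = pvMins a vs ++ [min (vs.foldl min a) v] := by
  induction vs generalizing a with
  | nil => simp [pvMins]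
  | cons w vs ih => simp [pvMins, ih]

lemma pv_ofList_append_length (xs : List Int) (x : Int) :
    (PySem.Set.ofList (xs ++ [x])).length =
      if x ∈ xs then (PySem.Set.ofList xs).length else (PySem.Set.ofList xs).length + 1 := by
  rw [PySem.Set.ofList_eq_foldl, List.foldl_append]
  simp only [List.foldl]
  rw [← PySem.Set.ofList_eq_foldl]
  by_cases h : x ∈ xs
  · rw [if_pos h]
    simp [PySem.Set.add, PySem.Set.contains, PySem.Set.mem_ofList, h]
  · rw [if_neg h]
    simp [PySem.Set.add, PySem.Set.contains, PySem.Set.mem_ofList, h]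

-- A's fold computes (distinct count of the prefix-min sequence, the running min)
lemma pv_invariant (vs : List Int) (a : Int) :
    vs.foldl pvStep (1, a) =
      (((PySem.Set.ofList (pvMins a vs)).length : Int), vs.foldl min a) := by
  induction vs using List.reverseRecOn with
  | nil => simp [pvMins, PySem.Set.ofList, PySem.Set.add]
  | append_singleton vs v ih =>
    rw [List.foldl_append, List.foldl_append, ih, pv_scanl_append, pv_ofList_append_length]
    simp only [List.foldl]
    by_cases h : vs.foldl min a > v
    · rw [if_neg, pvStep, if_pos h]
      · simp [min_eq_right (le_of_lt h)]
      · intro hmem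
        exact absurd (pv_mins_head_le vs a _ hmem) (by omega)
    · rw [if_pos, pvStep, if_neg h]
      · simp [min_eq_left (by omega : vs.foldl min a ≤ v)]
      · rw [min_eq_left (by omega : vs.foldl min a ≤ v)]
        exact pv_foldl_min_mem_scanl vs a

-- the prefix-min table is the scanl of min
lemma pv_table_eq_scanl (vs : List Int) (a : Int) :
    (List.range (vs.length + 1)).map (fun k => ((vs.take k).foldl min a)) = pvMins a vs := by
  induction vs generalizing a with
  | nil => simp [pvMins]
  | cons v vs ih =>
    rw [show (v :: vs).length + 1 = (vs.length + 1) + 1 from by simp, List.range_succ_eq_map]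
    simp only [List.map_cons, List.take_zero, List.foldl_nil, List.map_map]
    congr 1
    rw [← ih (min a v)]
    apply List.map_congr_left
    intro k _
    simp [List.foldl_cons]

-- ===== VERDICT (by name: the statement is the Claim_ definition above) =====
theorem solution_spec : Claim_equal_solution := by
  intro l _ hpre
  unfold Spec_solution
  obtain ⟨h, t, rfl⟩ := List.exists_cons_of_ne_nil hpre
  unfold solution solution_alt
  simp only [PySem.List.pyGetD_zero_cons]
  -- A side: index loop → value fold
  have e1 : (fun (p : Int × Int) (i : Int) =>
        if p.2 > (PySem.List.pyGetD (h :: t) i (0, 0)).2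
        then (p.1 + 1, (PySem.List.pyGetD (h :: t) i (0, 0)).2) else p)
      = (fun (p : Int × Int) (i : Int) =>
          (fun (q : Int × Int) (pr : Int × Int) => pvStep q pr.2) p (PySem.List.pyGetD (h :: t) i (0, 0))) := rfl
  rw [e1, PySem.List.foldl_pyRange_pyGetD' (h :: t) (0, 0)
        (fun (p : Int × Int) pr => pvStep p pr.2) (1, h.2) (le_refl 0)]
  simp only [Int.toNat_zero, List.drop_zero]
  rw [show (fun (p : Int × Int) (pr : Int × Int) => pvStep p pr.2)
        = (fun x y => pvStep x (Prod.snd y)) from rfl, ← List.foldl_map]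
  -- B side: index table → prefix-min table
  rw [PySem.List.pyRange_zero_natCast, List.map_map]
  have htab : (List.range (h :: t).length).map
      ((fun i => (PySem.List.min? ((PySem.List.slice (h :: t) none (some (i + 1))).map Prod.snd)
                  (fun x => x)).getD 0) ∘ (fun k : Nat => (k : Int)))
      = pvMins h.2 (t.map Prod.snd) := by
    rw [← pv_table_eq_scanl (t.map Prod.snd) h.2]
    simp only [List.length_cons, List.length_map]
    apply List.map_congr_left
    intro k _
    have : ((k : Int) + 1) = ((k + 1 : Nat) : Int) := by push_cast; ring
    simp only [Function.comp, this, PySem.List.slice_to_natCast, List.take_succ_cons,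
      List.map_cons, PySem.List.min?_id_cons, Option.getD_some, List.map_take]
  rw [htab]
  -- A's value fold over the seconds
  simp only [List.map_cons, List.foldl_cons]
  rw [show pvStep (1, h.2) h.2 = (1, h.2) from by simp [pvStep]]
  rw [pv_invariant]

theorem solution_raises : Claim_raises_solution := by
  unfold Claim_raises_solution
  exact ⟨fun l _ h => by simp [Raises_solution, Pre_solution] at *; exact h, by decide⟩

-- self-check (keeps the crash-fix claim referenced): the raise region lies outside Pre_
lemma pv_raises_outside_pre_ok : ∀ (l : List (Int × Int)), Dom_solution l → Raises_solution l → ¬ Pre_solution l := by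
  have h := solution_raises
  unfold Claim_raises_solution at h
  exact h.1
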